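-- pv_equiv track=rewrite | github.com/Epik-Whale463/enterprise-ai-assistant-platform | backend/ai_core_github_integration.py | determine_tools_needed
-- ===== SOURCE A (Python) =====
-- from typing import Dict, List, Any, Optional
--
-- def determine_tools_needed(user_input: str) -> List[str]:
--     """
--     Determine which tools should be used based on user input with better intent detection.
--     """
--     user_lower = user_input.lower()
--     tools_needed = []
--
--     # Weather detection - be more specific
--     weather_keywords = ["weather", "temperature", "forecast", "climate", "hot", "cold", "rain", "snow"]
--     if any(keyword in user_lower for keyword in weather_keywords):
--         tools_needed.append("get_weather")
--
--     # Music detection - distinguish between search and play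
--     play_keywords = ["play", "change song", "change the song", "put on", "start playing"]
--     search_keywords = ["search for songs", "find songs", "look for music", "search music"]
--
--     if any(keyword in user_lower for keyword in play_keywords):
--         tools_needed.append("play_smart_track")
--     elif any(keyword in user_lower for keyword in search_keywords):
--         tools_needed.append("search_tracks")
--
--     # Volume control
--     if "volume" in user_lower and any(word in user_lower for word in ["set", "change", "turn", "up", "down"]):
--         tools_needed.append("set_volume")
--
--     # Music control
--     if "pause" in user_lower and "music" in user_lower:
--         tools_needed.append("pause_music")
--     if "skip" in user_lower and ("song" in user_lower or "track" in user_lower):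
--         tools_needed.append("skip_track")
--     if "current" in user_lower and ("song" in user_lower or "track" in user_lower or "playing" in user_lower):
--         tools_needed.append("current_track")
--
--     # Information lookup
--     info_keywords = ["what is", "tell me about", "information about", "explain", "define", "wikipedia"]
--     if any(keyword in user_lower for keyword in info_keywords):
--         tools_needed.append("wikipedia_lookup")
--
--     # Web search
--     search_keywords = ["search", "google", "look up", "find information"]
--     if any(keyword in user_lower for keyword in search_keywords) and "wikipedia" not in user_lower:
--         tools_needed.append("web_search")
--
--     # News
--     if any(keyword in user_lower for keyword in ["news", "headlines", "latest news", "current events"]):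
--         tools_needed.append("latest_news")
--
--     # Sequential thinking
--     thinking_keywords = ["step by step", "sequential", "think", "reasoning", "process", "analyze", "break down"]
--     if any(keyword in user_lower for keyword in thinking_keywords):
--         tools_needed.append("sequential_think")
--
--     # Image generation
--     image_keywords = ["generate image", "create image", "make image", "draw", "picture"]
--     if any(keyword in user_lower for keyword in image_keywords):
--         tools_needed.append("generate_image")
--
--     return tools_needed
-- ===== SOURCE B (Python) =====
-- from typing import List
--
-- # Declarative rule table: (tool, require_groups, forbid_keywords).
-- # A rule fires when EVERY group has at least one keyword occurring in the
-- # lowercased input and NO forbidden keyword occurs.  The play/"search music"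
-- # elif of the original is expressed by forbidding the play keywords on the
-- # search_tracks rule.  Rules are listed in the original's append order.
-- _RULES = [
--     ("get_weather",
--      [["weather", "temperature", "forecast", "climate", "hot", "cold", "rain", "snow"]], []),
--     ("play_smart_track",
--      [["play", "change song", "change the song", "put on", "start playing"]], []),
--     ("search_tracks",
--      [["search for songs", "find songs", "look for music", "search music"]],
--      ["play", "change song", "change the song", "put on", "start playing"]),
--     ("set_volume", [["volume"], ["set", "change", "turn", "up", "down"]], []),
--     ("pause_music", [["pause"], ["music"]], []),
--     ("skip_track", [["skip"], ["song", "track"]], []),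
--     ("current_track", [["current"], ["song", "track", "playing"]], []),
--     ("wikipedia_lookup",
--      [["what is", "tell me about", "information about", "explain", "define", "wikipedia"]], []),
--     ("web_search", [["search", "google", "look up", "find information"]], ["wikipedia"]),
--     ("latest_news", [["news", "headlines", "latest news", "current events"]], []),
--     ("sequential_think",
--      [["step by step", "sequential", "think", "reasoning", "process", "analyze", "break down"]], []),
--     ("generate_image",
--      [["generate image", "create image", "make image", "draw", "picture"]], []),
-- ]
--
-- def determine_tools_needed(user_input: str) -> List[str]:
--     low = user_input.lower()
--     out = []
--     for tool, groups, forbid in _RULES: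
--         if all(any(k in low for k in g) for g in groups) and not any(k in low for k in forbid):
--             out.append(tool)
--     return out
-- ===== Notes on version B (the rewrite author's own statement) =====
-- stated objective: simpler
-- what changed: Replaces the hand-written chain of if/elif keyword blocks by a declarative rule table (tool, required keyword groups, forbidden keywords) interpreted by one uniform loop; the play/search elif becomes a forbidden-keyword list on the search_tracks rule.
import Mathlib
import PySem

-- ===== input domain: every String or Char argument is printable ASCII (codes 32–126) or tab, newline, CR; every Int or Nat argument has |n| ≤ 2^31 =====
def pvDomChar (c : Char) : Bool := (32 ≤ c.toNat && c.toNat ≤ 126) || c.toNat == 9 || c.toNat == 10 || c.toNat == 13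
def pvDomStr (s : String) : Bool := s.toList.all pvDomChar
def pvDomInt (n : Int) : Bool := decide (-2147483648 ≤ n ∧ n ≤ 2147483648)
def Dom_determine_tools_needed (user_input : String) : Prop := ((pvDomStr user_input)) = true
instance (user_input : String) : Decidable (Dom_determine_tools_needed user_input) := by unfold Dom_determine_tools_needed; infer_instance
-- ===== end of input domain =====

-- B replaces A's hand-written chain of if/elif blocks by a declarative rule table
-- (tool, required keyword groups, forbidden keywords) interpreted by one uniform loop
-- (objective: simpler — the elif is encoded as a forbidden-keyword list).


-- ===== PORT A =====
def determine_tools_needed (user_input : String) : List String :=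
  let user_lower := PySem.Str.lower user_input
  let tools_needed : List String := []
  let weather_keywords := ["weather", "temperature", "forecast", "climate", "hot", "cold", "rain", "snow"]
  let tools_needed := if weather_keywords.any (fun k => PySem.Str.isIn k user_lower) then tools_needed ++ ["get_weather"] else tools_needed
  let play_keywords := ["play", "change song", "change the song", "put on", "start playing"]
  let search_keywords := ["search for songs", "find songs", "look for music", "search music"]
  let tools_needed :=
    if play_keywords.any (fun k => PySem.Str.isIn k user_lower) then tools_needed ++ ["play_smart_track"]
    else if search_keywords.any (fun k => PySem.Str.isIn k user_lower) then tools_needed ++ ["search_tracks"]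
    else tools_needed
  let tools_needed :=
    if PySem.Str.isIn "volume" user_lower && ["set", "change", "turn", "up", "down"].any (fun w => PySem.Str.isIn w user_lower)
    then tools_needed ++ ["set_volume"] else tools_needed
  let tools_needed :=
    if PySem.Str.isIn "pause" user_lower && PySem.Str.isIn "music" user_lower
    then tools_needed ++ ["pause_music"] else tools_needed
  let tools_needed :=
    if PySem.Str.isIn "skip" user_lower && (PySem.Str.isIn "song" user_lower || PySem.Str.isIn "track" user_lower)
    then tools_needed ++ ["skip_track"] else tools_needed
  let tools_needed :=
    if PySem.Str.isIn "current" user_lower && (PySem.Str.isIn "song" user_lower || PySem.Str.isIn "track" user_lower || PySem.Str.isIn "playing" user_lower)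
    then tools_needed ++ ["current_track"] else tools_needed
  let info_keywords := ["what is", "tell me about", "information about", "explain", "define", "wikipedia"]
  let tools_needed := if info_keywords.any (fun k => PySem.Str.isIn k user_lower) then tools_needed ++ ["wikipedia_lookup"] else tools_needed
  let search_keywords2 := ["search", "google", "look up", "find information"]
  let tools_needed :=
    if search_keywords2.any (fun k => PySem.Str.isIn k user_lower) && !(PySem.Str.isIn "wikipedia" user_lower)
    then tools_needed ++ ["web_search"] else tools_needed
  let tools_needed :=
    if ["news", "headlines", "latest news", "current events"].any (fun k => PySem.Str.isIn k user_lower)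
    then tools_needed ++ ["latest_news"] else tools_needed
  let thinking_keywords := ["step by step", "sequential", "think", "reasoning", "process", "analyze", "break down"]
  let tools_needed := if thinking_keywords.any (fun k => PySem.Str.isIn k user_lower) then tools_needed ++ ["sequential_think"] else tools_needed
  let image_keywords := ["generate image", "create image", "make image", "draw", "picture"]
  let tools_needed := if image_keywords.any (fun k => PySem.Str.isIn k user_lower) then tools_needed ++ ["generate_image"] else tools_needed
  tools_needed

-- ===== PORT B =====
-- rule table: (tool, required keyword groups, forbidden keywords)
def pvRules : List (String × List (List String) × List String) :=
  [("get_weather", [["weather", "temperature", "forecast", "climate", "hot", "cold", "rain", "snow"]], []),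
   ("play_smart_track", [["play", "change song", "change the song", "put on", "start playing"]], []),
   ("search_tracks", [["search for songs", "find songs", "look for music", "search music"]],
      ["play", "change song", "change the song", "put on", "start playing"]),
   ("set_volume", [["volume"], ["set", "change", "turn", "up", "down"]], []),
   ("pause_music", [["pause"], ["music"]], []),
   ("skip_track", [["skip"], ["song", "track"]], []),
   ("current_track", [["current"], ["song", "track", "playing"]], []),
   ("wikipedia_lookup", [["what is", "tell me about", "information about", "explain", "define", "wikipedia"]], []),
   ("web_search", [["search", "google", "look up", "find information"]], ["wikipedia"]),
   ("latest_news", [["news", "headlines", "latest news", "current events"]], []),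
   ("sequential_think", [["step by step", "sequential", "think", "reasoning", "process", "analyze", "break down"]], []),
   ("generate_image", [["generate image", "create image", "make image", "draw", "picture"]], [])]

def determine_tools_needed_alt (user_input : String) : List String :=
  let low := PySem.Str.lower user_input
  pvRules.foldl (fun out r =>
    if (r.2.1.all fun g => g.any fun k => PySem.Str.isIn k low)
        && !(r.2.2.any fun k => PySem.Str.isIn k low)
    then out ++ [r.1] else out) []

-- ===== PRECONDITION & SPEC =====
def Spec_determine_tools_needed (user_input : String) (out : List String) : Prop := out = determine_tools_needed_alt user_input
instance (user_input : String) (out : List String) : Decidable (Spec_determine_tools_needed user_input out) := by unfold Spec_determine_tools_needed; infer_instance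

-- ===== CLAIM (what is proved, stated in full; the proofs are below) =====
def Claim_equal_determine_tools_needed : Prop := ∀ (user_input : String), Dom_determine_tools_needed user_input → Spec_determine_tools_needed user_input (determine_tools_needed user_input)

-- ===== LEMMAS AND PROOFS =====
-- A's play/search elif versus B's pair of rules (the second forbidding the play keywords)
theorem pv_elif_split (p q : Bool) (t : List String) (x y : String) :
    (if (q && !p) = true then (if p = true then t ++ [x] else t) ++ [y]
     else (if p = true then t ++ [x] else t))
    = (if p = true then t ++ [x] else if q = true then t ++ [y] else t) := by
  cases p <;> cases q <;> simp

-- ===== VERDICT (by name: the statement is the Claim_ definition above) =====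
theorem determine_tools_needed_spec : Claim_equal_determine_tools_needed := by
  intro user_input _
  unfold Spec_determine_tools_needed determine_tools_needed determine_tools_needed_alt pvRules
  simp only [List.foldl, List.any_cons, List.any_nil, List.all_cons, List.all_nil,
    Bool.or_false, Bool.and_true, Bool.not_false, Bool.or_assoc]
  rw [pv_elif_split]
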